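-- pv_equiv track=rewrite | github.com/eulixir/pdf2epub | app/domain/services/text_processor.py | process_paragraphs
-- ===== SOURCE A (Python) =====
-- def format_paragraph(text):
--     text = text.strip()
--     if not text:
--         return ""
--     if text.endswith(('.', '!', '?', ':', ';')):
--         return f"<p>{text}</p>"
--     return f"<p>{text}.</p>"
--
-- def process_paragraphs(text):
--     paragraphs = []
--     current_paragraph = []
--
--     for line in text.split('\n'):
--         line = line.strip()
--         if not line:
--             if current_paragraph:
--                 paragraphs.append(format_paragraph(' '.join(current_paragraph)))
--                 current_paragraph = []
--         else:
--             current_paragraph.append(line)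
--
--     if current_paragraph:
--         paragraphs.append(format_paragraph(' '.join(current_paragraph)))
--
--     return paragraphs
-- ===== SOURCE B (Python) =====
-- def format_paragraph(text):
--     text = text.strip()
--     if not text:
--         return ""
--     if text.endswith(('.', '!', '?', ':', ';')):
--         return f"<p>{text}</p>"
--     return f"<p>{text}.</p>"
--
-- def process_paragraphs(text):
--     # Two-pointer scan over the pre-stripped lines: find each maximal run of
--     # non-blank lines and format it, instead of a flush-on-blank state machine.
--     lines = [l.strip() for l in text.split('\n')]
--     out = []
--     i, n = 0, len(lines)
--     while i < n:
--         if not lines[i]: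
--             i += 1
--             continue
--         j = i + 1
--         while j < n and lines[j]:
--             j += 1
--         out.append(format_paragraph(' '.join(lines[i:j])))
--         i = j
--     return out
-- ===== Notes on version B (the rewrite author's own statement) =====
-- stated objective: alternative
-- what changed: Replaced A's accumulator/flush state machine with a pre-stripped line list and a two-pointer scan that slices out each maximal run of non-blank lines and formats it directly.
import Mathlib
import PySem

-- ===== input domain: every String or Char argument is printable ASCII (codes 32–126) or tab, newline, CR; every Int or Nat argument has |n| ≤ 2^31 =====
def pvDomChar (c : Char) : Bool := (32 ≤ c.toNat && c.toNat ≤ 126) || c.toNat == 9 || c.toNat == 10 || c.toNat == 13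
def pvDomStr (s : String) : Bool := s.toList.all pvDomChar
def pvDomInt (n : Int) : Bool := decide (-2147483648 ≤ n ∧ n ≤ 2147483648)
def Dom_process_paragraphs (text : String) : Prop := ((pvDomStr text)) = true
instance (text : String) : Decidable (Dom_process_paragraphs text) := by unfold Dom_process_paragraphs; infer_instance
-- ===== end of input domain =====

-- B replaces A's accumulator/flush state machine with a two-pointer scan over
-- pre-stripped lines (alternative decomposition, same cost).

-- shared helper, unchanged between A and B (both Pythons define it identically)
def format_paragraph (t0 : String) : String :=
  let t := PySem.Str.strip t0
  if t = "" then ""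
  else if (PySem.Str.endswith t "." || PySem.Str.endswith t "!" || PySem.Str.endswith t "?"
        || PySem.Str.endswith t ":" || PySem.Str.endswith t ";") then
    "<p>" ++ t ++ "</p>"
  else "<p>" ++ t ++ ".</p>"

-- ===== PORT A =====
def process_paragraphs (text : String) : List String :=
  let st := ((PySem.Str.split? text "\n").getD []).foldl
    (fun (st : List String × List String) line =>
      let line := PySem.Str.strip line
      if line = "" then
        (if st.2 = [] then st
         else (st.1 ++ [format_paragraph (PySem.Str.join " " st.2)], []))
      else (st.1, st.2 ++ [line]))
    ([], [])
  if st.2 = [] then st.1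
  else st.1 ++ [format_paragraph (PySem.Str.join " " st.2)]

-- ===== PORT B =====
-- the two inner while-loops of Source B: skip a blank line, or take the maximal
-- non-blank run (lines[i:j]) and recurse on the rest (lines[j:])
def pvChunks : List String → List (List String)
  | [] => []
  | l :: ls =>
    if l = "" then pvChunks ls
    else (l :: ls.takeWhile (· ≠ "")) :: pvChunks (ls.dropWhile (· ≠ ""))
termination_by ls => ls.length
decreasing_by
  all_goals
    have := List.length_dropWhile_le (fun x => decide (x ≠ "")) ls
    simp at this ⊢
    try omega

def process_paragraphs_alt (text : String) : List String :=
  let lines := ((PySem.Str.split? text "\n").getD []).map PySem.Str.strip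
  (pvChunks lines).map (fun c => format_paragraph (PySem.Str.join " " c))

-- ===== PRECONDITION & SPEC =====
def Spec_process_paragraphs (text : String) (out : List String) : Prop := out = process_paragraphs_alt text
instance (text : String) (out : List String) : Decidable (Spec_process_paragraphs text out) := by unfold Spec_process_paragraphs; infer_instance

-- ===== CLAIM (what is proved, stated in full; the proofs are below) =====
def Claim_equal_process_paragraphs : Prop := ∀ (text : String), Dom_process_paragraphs text → Spec_process_paragraphs text (process_paragraphs text)

-- ===== LEMMAS AND PROOFS =====

-- A's chunking with a pending paragraph `cur`, abstracted from its fold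
def pvChunksP : List String → List String → List (List String)
  | cur, [] => if cur = [] then [] else [cur]
  | cur, l :: ls =>
    if l = "" then (if cur = [] then pvChunksP [] ls else cur :: pvChunksP [] ls)
    else pvChunksP (cur ++ [l]) ls

lemma pvChunks_blank (ls : List String) : pvChunks ("" :: ls) = pvChunks ls := by
  rw [pvChunks]; simp

lemma pvChunks_cons {l : String} (ls : List String) (hl : l ≠ "") :
    pvChunks (l :: ls) =
      (l :: ls.takeWhile (· ≠ "")) :: pvChunks (ls.dropWhile (· ≠ "")) := by
  rw [pvChunks]; simp [hl]

-- A's fold computes acc ++ the formatted chunks of the stripped lines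
lemma pvFold_eq (g : List String → String) :
    ∀ (ls : List String) (acc cur : List String),
      ((fun st => if st.2 = [] then st.1 else st.1 ++ [g st.2]) (ls.foldl
        (fun (st : List String × List String) line =>
          let line := PySem.Str.strip line
          if line = "" then
            (if st.2 = [] then st else (st.1 ++ [g st.2], []))
          else (st.1, st.2 ++ [line])) (acc, cur)))
      = acc ++ (pvChunksP cur (ls.map PySem.Str.strip)).map g := by
  intro ls
  induction ls with
  | nil =>
      intro acc cur
      simp only [List.foldl_nil, List.map_nil, pvChunksP]
      split_ifs <;> simp_all
  | cons l ls ih =>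
      intro acc cur
      simp only [List.foldl_cons, List.map_cons, pvChunksP]
      by_cases hl : PySem.Str.strip l = "" <;> by_cases hc : cur = [] <;>
        simp_all

-- pvChunksP in terms of B's pvChunks
lemma pvChunksP_eq : ∀ (ls cur : List String),
    pvChunksP cur ls =
      if cur = [] then pvChunks ls
      else (cur ++ ls.takeWhile (· ≠ "")) :: pvChunks (ls.dropWhile (· ≠ "")) := by
  intro ls
  induction ls with
  | nil =>
      intro cur
      simp [pvChunksP, pvChunks]
  | cons l ls ih =>
      intro cur
      by_cases hl : l = ""
      · subst hl
        rw [pvChunksP, if_pos rfl, pvChunks_blank]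
        by_cases hc : cur = []
        · rw [if_pos hc, if_pos hc, ih, if_pos rfl]
        · rw [if_neg hc, if_neg hc, ih, if_pos rfl]
          simp
          rw [pvChunks_blank]
      · rw [pvChunksP, if_neg hl, ih (cur ++ [l]), if_neg (by simp),
            pvChunks_cons ls hl]
        by_cases hc : cur = [] <;> simp [hc, hl]

-- ===== VERDICT (by name: the statement is the Claim_ definition above) =====
theorem process_paragraphs_spec : Claim_equal_process_paragraphs := by
  intro text _
  unfold Spec_process_paragraphs process_paragraphs process_paragraphs_alt
  exact (pvFold_eq (fun c => format_paragraph (PySem.Str.join " " c))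
      ((PySem.Str.split? text "\n").getD []) [] []).trans
    (by rw [pvChunksP_eq]; simp)
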